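-- pv_equiv track=rewrite | github.com/Journey5873/coding-interview | programmers/picking_tangerines.py | solution
-- ===== SOURCE A (Python) =====
-- def solution(k, tangerine):
--     answer = 0
--     current = 0
--     tan_dic = {}
--
--     for t in tangerine:
--         if t in tan_dic:
--             tan_dic[t] += 1
--         else:
--             tan_dic[t] = 1
--
--     sorted_tan = dict(sorted(tan_dic.items(), key=lambda x: x[1], reverse=True))
--
--     for key in sorted_tan:
--         if k > current:
--             answer += 1
--             current += sorted_tan[key]
--
--         if current == k:
--             break
--
--     return answer
-- ===== SOURCE B (Python) =====
-- def solution(k, tangerine):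
--     # counting-sort on frequencies: bucket the counts instead of comparison-sorting them
--     counts = {}
--     for t in tangerine:
--         counts[t] = counts.get(t, 0) + 1
--     bucket = {}
--     for c in counts.values():
--         bucket[c] = bucket.get(c, 0) + 1
--     answer = 0
--     remaining = k
--     for c in range(len(tangerine), 0, -1):
--         m = bucket.get(c, 0)
--         while m > 0 and remaining > 0:
--             answer += 1
--             remaining -= c
--             m -= 1
--     return answer
-- ===== Notes on version B (the rewrite author's own statement) =====
-- stated objective: alternative
-- what changed: A comparison-sorts the frequency table (sorted by count, descending) and walks it with a break; B never sorts: it buckets the frequencies into a second counter and walks the possible frequency values from len(tangerine) down to 1, taking groups greedily.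
import Mathlib
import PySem

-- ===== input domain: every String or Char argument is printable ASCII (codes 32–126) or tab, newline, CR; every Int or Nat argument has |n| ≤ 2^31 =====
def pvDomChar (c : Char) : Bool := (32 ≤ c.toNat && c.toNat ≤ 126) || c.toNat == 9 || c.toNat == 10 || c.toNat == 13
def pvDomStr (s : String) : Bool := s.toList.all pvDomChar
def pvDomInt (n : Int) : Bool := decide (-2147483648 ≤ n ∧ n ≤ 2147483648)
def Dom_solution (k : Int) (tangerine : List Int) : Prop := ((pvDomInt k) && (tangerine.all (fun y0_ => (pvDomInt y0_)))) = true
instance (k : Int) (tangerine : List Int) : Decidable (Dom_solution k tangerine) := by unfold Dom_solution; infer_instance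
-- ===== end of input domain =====

-- B replaces A's comparison sort of the frequency table by a counting-sort bucket walk over possible frequencies.

-- ===== PORT A =====
-- the 'for key in sorted_tan: … break' loop of A
def aLoop (k : Int) (d : PySem.Dict Int Int) : List Int → Int → Int → Int
  | [], answer, _ => answer
  | key :: rest, answer, current =>
    let st := if k > current then (answer + 1, current + d.getD key 0) else (answer, current)
    if st.2 == k then st.1 else aLoop k d rest st.1 st.2

def solution (k : Int) (tangerine : List Int) : Int :=
  let tan_dic : PySem.Dict Int Int :=
    tangerine.foldl
      (fun d t => if d.contains t then d.insert t (d.getD t 0 + 1) else d.insert t 1)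
      PySem.Dict.empty
  let sorted_tan : PySem.Dict Int Int :=
    (PySem.List.sorted tan_dic.items (fun x => x.2) true).foldl
      (fun d p => d.insert p.1 p.2) PySem.Dict.empty
  aLoop k sorted_tan sorted_tan.keys 0 0

-- ===== PORT B =====
-- the inner 'while m > 0 and remaining > 0' loop of B
def bInner (c : Int) (m : Int) (answer : Int) (remaining : Int) : Int × Int :=
  if _h : 0 < m ∧ 0 < remaining then bInner c (m - 1) (answer + 1) (remaining - c)
  else (answer, remaining)
termination_by m.toNat
decreasing_by omega

def solution_alt (k : Int) (tangerine : List Int) : Int :=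
  let counts : PySem.Dict Int Int :=
    tangerine.foldl (fun d t => d.insert t (d.getD t 0 + 1)) PySem.Dict.empty
  let bucket : PySem.Dict Int Int :=
    counts.values.foldl (fun d c => d.insert c (d.getD c 0 + 1)) PySem.Dict.empty
  let st := (PySem.List.pyRange (tangerine.length : Int) 0 (-1)).foldl
      (fun s c => bInner c (bucket.getD c 0) s.1 s.2) (0, k)
  st.1

-- ===== PRECONDITION & SPEC =====
def Spec_solution (k : Int) (tangerine : List Int) (out : Int) : Prop := out = solution_alt k tangerine
instance (k : Int) (tangerine : List Int) (out : Int) : Decidable (Spec_solution k tangerine out) := by unfold Spec_solution; infer_instance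

-- ===== CLAIM (what is proved, stated in full; the proofs are below) =====
def Claim_equal_solution : Prop := ∀ (k : Int) (tangerine : List Int), Dom_solution k tangerine → Spec_solution k tangerine (solution k tangerine)

-- ===== LEMMAS AND PROOFS =====

-- the common greedy step, on state (answer, remaining)
def gstep (s : Int × Int) (c : Int) : Int × Int := if 0 < s.2 then (s.1 + 1, s.2 - c) else s

theorem foldl_gstep_nonpos (l : List Int) (s : Int × Int) (h : s.2 ≤ 0) :
    l.foldl gstep s = s := by
  induction l with
  | nil => rfl
  | cons c t ih => simp [List.foldl_cons, gstep, not_lt.mpr h, ih]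

theorem aLoop_eq_foldl (k : Int) (d : PySem.Dict Int Int) (pairs : List (Int × Int))
    (h : ∀ p ∈ pairs, d.getD p.1 0 = p.2) (a cur : Int) :
    aLoop k d (pairs.map (·.1)) a cur = ((pairs.map (·.2)).foldl gstep (a, k - cur)).1 := by
  induction pairs generalizing a cur with
  | nil => rfl
  | cons p rest ih =>
    have hp : d.getD p.1 0 = p.2 := h p (List.mem_cons_self ..)
    have hrest : ∀ q ∈ rest, d.getD q.1 0 = q.2 := fun q hq => h q (List.mem_cons_of_mem _ hq)
    simp only [List.map_cons, aLoop, hp, List.foldl_cons]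
    by_cases hk : k > cur
    · simp only [if_pos hk, gstep, if_pos (by omega : (0:Int) < k - cur)]
      by_cases he : cur + p.2 = k
      · have : ((cur + p.2 : Int) == k) = true := by simp [he]
        rw [foldl_gstep_nonpos _ _ (by simp; omega)]
        simp [this]
      · have : ((cur + p.2 : Int) == k) = false := by simp [he]
        rw [ih hrest]
        simp [this]
        ring_nf
    · simp only [if_neg hk, gstep, if_neg (by omega : ¬ (0:Int) < k - cur)]
      by_cases he : cur = k
      · have : ((cur : Int) == k) = true := by simp [he]
        rw [foldl_gstep_nonpos _ _ (by simp; omega)]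
        simp [this]
      · have : ((cur : Int) == k) = false := by simp [he]
        rw [ih hrest]
        simp [this]

theorem bInner_eq_foldl (c : Int) (n : Nat) : ∀ (m : Int), m.toNat = n → ∀ (a r : Int),
    bInner c m a r = (List.replicate n c).foldl gstep (a, r) := by
  induction n with
  | zero =>
    intro m hm a r
    rw [bInner]
    rw [dif_neg (by omega)]
    rfl
  | succ n ih =>
    intro m hm a r
    rw [bInner, List.replicate_succ, List.foldl_cons]
    by_cases hr : 0 < r
    · rw [dif_pos ⟨by omega, hr⟩, ih (m - 1) (by omega)]
      simp [gstep, hr]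
    · rw [dif_neg (by omega)]
      have hg : gstep (a, r) c = (a, r) := by simp [gstep, hr]
      rw [hg, foldl_gstep_nonpos _ _ (by simpa using by omega : ((a, r) : Int × Int).2 ≤ 0)]

theorem foldl_foldl_eq_flatMap {α β : Type} (f : (Int × Int) → β → (Int × Int))
    (g : α → List β) (L : List α) (s : Int × Int) :
    L.foldl (fun s c => (g c).foldl f s) s = (L.flatMap g).foldl f s := by
  induction L generalizing s with
  | nil => rfl
  | cons c t ih => simp [List.flatMap_cons, List.foldl_append, ih]

theorem count_flatMap_replicate (f : Int → Nat) (L : List Int) (hL : L.Nodup) (x : Int) :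
    (L.flatMap (fun c => List.replicate (f c) c)).count x = if x ∈ L then f x else 0 := by
  induction L with
  | nil => simp
  | cons c t ih =>
    rcases List.nodup_cons.mp hL with ⟨hc, ht⟩
    rw [List.flatMap_cons, List.count_append, ih ht, List.count_replicate]
    by_cases hx : x = c
    · subst hx
      simp [hc]
    · simp [hx, Ne.symm hx]

theorem pairwise_flatMap_replicate (f : Int → Nat) (L : List Int)
    (hL : L.Pairwise (· > ·)) :
    (L.flatMap (fun c => List.replicate (f c) c)).Pairwise (fun a b => b ≤ a) := by
  induction L with
  | nil => simp
  | cons c t ih =>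
    rcases List.pairwise_cons.mp hL with ⟨hc, ht⟩
    rw [List.flatMap_cons]
    refine List.pairwise_append.mpr ⟨List.pairwise_replicate.mpr (Or.inr le_rfl), ih ht, ?_⟩
    intro a ha b hb
    rcases List.mem_flatMap.mp hb with ⟨c', hc', hb'⟩
    rw [List.eq_of_mem_replicate ha, List.eq_of_mem_replicate hb']
    exact le_of_lt (hc c' hc')

-- ===== VERDICT (by name: the statement is the Claim_ definition above) =====
theorem dict_A_eq_counter (tangerine : List Int) :
    tangerine.foldl
      (fun d t => if d.contains t then d.insert t (d.getD t 0 + 1) else d.insert t 1)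
      PySem.Dict.empty = PySem.Dict.counter tangerine := by
  rw [← PySem.Dict.foldl_insert_getD_add_one_eq_counter]
  refine PySem.List.foldl_congr_mem _ _ _ _ ?_
  intro d t _
  by_cases hc : d.contains t
  · simp [hc]
  · have hc' : d.contains t = false := by simpa using hc
    rw [if_neg hc, PySem.Dict.getD_of_not_contains d 0 hc']
    norm_num

theorem solution_spec : Claim_equal_solution := by
  intro k tangerine _
  show solution k tangerine = solution_alt k tangerine
  have hcast : ∀ m : Nat, ((m : Int)).toNat = m := fun m => Int.toNat_natCast m
  simp only [solution, solution_alt, dict_A_eq_counter,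
    PySem.Dict.foldl_insert_getD_add_one_eq_counter]
  set C : PySem.Dict Int Int := PySem.Dict.counter tangerine with hC
  set sitems := PySem.List.sorted C.items (fun x => x.2) true with hsitems
  -- the dict built from the sorted items
  have hfresh : ∀ p ∈ sitems, (PySem.Dict.empty : PySem.Dict Int Int).contains p.1 = false := by
    intro p _; simp [PySem.Dict.contains_empty]
  have hCitems_fst : C.items.map (fun p : Int × Int => p.1) = C.keys := rfl
  have hperm : sitems.Perm C.items := PySem.List.sorted_perm _ _ _
  have hfstnodup : (sitems.map (fun p : Int × Int => p.1)).Nodup := by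
    refine (List.Perm.nodup_iff (List.Perm.map _ hperm)).mpr ?_
    rw [hCitems_fst]
    exact PySem.Dict.nodup_keys_counter tangerine
  have hDitems : (sitems.foldl (fun d p => d.insert p.1 p.2) PySem.Dict.empty).items = sitems := by
    rw [PySem.Dict.items_foldl_insert_fresh sitems (fun p => p.1) (fun p => p.2) _ hfresh hfstnodup]
    simp [show (PySem.Dict.empty : PySem.Dict Int Int).items = [] from rfl]
  set D := sitems.foldl (fun d p => d.insert p.1 p.2) PySem.Dict.empty with hD
  have hDkeys : D.keys = sitems.map (fun p : Int × Int => p.1) := by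
    show D.items.map _ = _
    rw [hDitems]
  have hDnodup : D.keys.Nodup := by rw [hDkeys]; exact hfstnodup
  have hgetD : ∀ p ∈ sitems, D.getD p.1 0 = p.2 := by
    intro p hp
    refine PySem.Dict.getD_of_mem_items _ ?_ hDnodup 0
    rw [hDitems]
    simpa using hp
  rw [hDkeys, aLoop_eq_foldl k D sitems hgetD 0 0]
  -- B side
  set vals := C.values with hvals
  have hbg : ∀ c : Int, (PySem.Dict.counter vals).getD c 0 = (vals.count c : Int) :=
    fun c => PySem.Dict.getD_counter vals c
  have hBfold : ∀ s : Int × Int, ∀ c : Int,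
      bInner c ((PySem.Dict.counter vals).getD c 0) s.1 s.2
        = (List.replicate (vals.count c) c).foldl gstep s := by
    intro s c
    rw [hbg, bInner_eq_foldl c (vals.count c) _ (hcast _)]
  have hstep : (fun (s : Int × Int) (c : Int) => bInner c ((PySem.Dict.counter vals).getD c 0) s.1 s.2)
      = fun s c => (List.replicate (vals.count c) c).foldl gstep s := by
    funext s c; exact hBfold s c
  rw [hstep, foldl_foldl_eq_flatMap]
  -- the two count lists are equal
  set R := PySem.List.pyRange (tangerine.length : Int) 0 (-1) with hR
  have hRnodup : R.Nodup := by
    rw [hR, PySem.List.pyRange_neg_one_eq_reverse, List.nodup_reverse]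
    exact PySem.List.nodup_pyRange_one _ _
  have hRpair : R.Pairwise (· > ·) := by
    rw [hR, PySem.List.pyRange_neg_one_eq_reverse, List.pairwise_reverse]
    exact PySem.List.pairwise_lt_pyRange_one _ _
  have hvals_mem : ∀ v ∈ vals, 0 < v ∧ v ≤ (tangerine.length : Int) := by
    intro v hv
    rw [hvals] at hv
    have : v ∈ C.items.map (fun p : Int × Int => p.2) := hv
    rw [hC, PySem.Dict.items_counter, List.map_map] at this
    rcases List.mem_map.mp this with ⟨key, hkey, hvk⟩
    have hkmem : key ∈ tangerine := (PySem.Set.mem_ofList _ _).mp hkey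
    have h1 : 0 < tangerine.count key := List.count_pos_iff.mpr hkmem
    have h2 : tangerine.count key ≤ tangerine.length := List.count_le_length
    constructor <;> [skip; skip] <;> · rw [← hvk]; simp; omega
  have hApermvals : (sitems.map (fun p : Int × Int => p.2)).Perm vals :=
    List.Perm.map _ hperm
  have hBperm : (R.flatMap (fun c => List.replicate (vals.count c) c)).Perm vals := by
    refine (List.perm_iff_count.mpr ?_)
    intro x
    rw [count_flatMap_replicate _ _ hRnodup]
    by_cases hx : x ∈ R
    · rw [if_pos hx]
    · rw [if_neg hx]
      refine (List.count_eq_zero.mpr ?_).symm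
      intro hxv
      rcases hvals_mem x hxv with ⟨h1, h2⟩
      exact hx (by rw [hR]; exact PySem.List.mem_pyRange_neg_one.mpr ⟨h1, h2⟩)
  have hA_pair : (sitems.map (fun p : Int × Int => p.2)).Pairwise (fun a b => b ≤ a) := by
    rw [List.pairwise_map]
    exact PySem.List.sorted_pairwise_rev _ _
  have hB_pair : (R.flatMap (fun c => List.replicate (vals.count c) c)).Pairwise (fun a b => b ≤ a) :=
    pairwise_flatMap_replicate _ _ hRpair
  have heq : sitems.map (fun p : Int × Int => p.2) = R.flatMap (fun c => List.replicate (vals.count c) c) := by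
    exact (hApermvals.trans hBperm.symm).eq_of_pairwise
      (fun a b _ _ h1 h2 => le_antisymm h2 h1) hA_pair hB_pair
  rw [heq]
  norm_num
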